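-- pv_equiv track=rewrite | github.com/Daishijun/InterviewAlgorithmCoding | ZuoShenBook/RecurAndDP/robotMoveTargetMethods.py | walk2
-- ===== SOURCE A (Python) =====
-- def walk2(N, M, K, P):
--     if N<2 or K <1 or M<1 or M>N or P<1 or P>N:
--         return 0
--     dp = [[0 for i in range(N+1)] for j in range(K+1)]
--     dp[0][P] = 1
--     for i in range(1,K+1):
--         for j in range(1, N+1):
--             if j == 1:
--                 dp[i][j] = dp[i-1][2]
--             elif j ==N:
--                 dp[i][j] = dp[i-1][N-1]
--             else:
--                 dp[i][j] = dp[i-1][j-1]+dp[i-1][j+1]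
--     return dp[K][M]
-- ===== SOURCE B (Python) =====
-- def walk2(N, M, K, P):
--     if N < 2 or K < 1 or M < 1 or M > N or P < 1 or P > N:
--         return 0
--     # Reflection principle on the line with walls at 0 and N+1:
--     # number of +-1 walks P -> M of length K staying in [1, N] equals
--     # sum over mirror images  sum_t [ C(K,(K+M-P+2tL)/2) - C(K,(K-M-P+2tL)/2) ]
--     # with L = N+1, where a binomial term is 0 unless the displacement d
--     # satisfies |d| <= K and K+d is even.
--     L = N + 1
--     w = K // (2 * L) + 1
--     total = 0
--     for t in range(-w, w + 1):
--         total += _hits(K, M - P + 2 * t * L) - _hits(K, -M - P + 2 * t * L)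
--     return total
--
-- def _hits(K, d):
--     # number of unconstrained +-1 walks of length K with net displacement d
--     if d < -K or d > K or (K + d) % 2 != 0:
--         return 0
--     return _binom(K, (K + d) // 2)
--
-- def _binom(n, k):
--     c = 1
--     for i in range(k):
--         c = c * (n - i) // (i + 1)
--     return c
-- ===== Notes on version B (the rewrite author's own statement) =====
-- stated objective: alternative
-- what changed: A fills a (K+1)x(N+1) dynamic-programming table with nested loops and reads dp[K][M]; B evaluates a reflection-principle closed form instead: a sum, over the walk's mirror images between the two walls, of binomial coefficients computed by a multiplicative loop, with no DP table at all.
import Mathlib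
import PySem

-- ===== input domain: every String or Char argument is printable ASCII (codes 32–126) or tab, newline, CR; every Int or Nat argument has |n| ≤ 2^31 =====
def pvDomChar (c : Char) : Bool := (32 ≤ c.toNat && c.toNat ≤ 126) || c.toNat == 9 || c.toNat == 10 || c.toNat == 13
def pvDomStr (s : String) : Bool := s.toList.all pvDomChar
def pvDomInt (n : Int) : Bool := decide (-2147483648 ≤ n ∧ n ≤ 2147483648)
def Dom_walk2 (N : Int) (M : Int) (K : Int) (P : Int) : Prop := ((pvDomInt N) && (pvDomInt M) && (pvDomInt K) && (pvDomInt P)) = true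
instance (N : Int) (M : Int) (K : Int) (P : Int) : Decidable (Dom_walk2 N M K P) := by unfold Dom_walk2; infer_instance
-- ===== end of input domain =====

-- B replaces A's dynamic-programming table by a reflection-principle closed
-- form (a sum of binomial coefficients over the walk's mirror images);
-- return-value equivalence (neither program mutates its arguments).

-- ===== PORT A =====
-- Literal port of A: full 2-D table dp, dp[0][P]=1, nested index loops assigning dp[i][j].
-- Every index A reads or writes is nonnegative and in range (the guard gives
-- 2 <= N, 1 <= K, 1 <= M,P <= N), so the total forms pyGetD/pySetD are exact here.
def walk2 (N : Int) (M : Int) (K : Int) (P : Int) : Int :=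
  if N < 2 ∨ K < 1 ∨ M < 1 ∨ M > N ∨ P < 1 ∨ P > N then 0
  else
    let dp0 : List (List Int) :=
      (PySem.List.pyRange 0 (K+1) 1).map (fun _ => (PySem.List.pyRange 0 (N+1) 1).map (fun _ => (0:Int)))
    let dp1 := PySem.List.pySetD dp0 0 (PySem.List.pySetD (PySem.List.pyGetD dp0 0 []) P 1)
    let dpF := (PySem.List.pyRange 1 (K+1) 1).foldl (fun dp i =>
      (PySem.List.pyRange 1 (N+1) 1).foldl (fun dp j =>
        let v : Int :=
          if j = 1 then PySem.List.pyGetD (PySem.List.pyGetD dp (i-1) []) 2 0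
          else if j = N then PySem.List.pyGetD (PySem.List.pyGetD dp (i-1) []) (N-1) 0
          else PySem.List.pyGetD (PySem.List.pyGetD dp (i-1) []) (j-1) 0
               + PySem.List.pyGetD (PySem.List.pyGetD dp (i-1) []) (j+1) 0
        PySem.List.pySetD dp i (PySem.List.pySetD (PySem.List.pyGetD dp i []) j v)) dp) dp1
    PySem.List.pyGetD (PySem.List.pyGetD dpF K []) M 0

-- ===== PORT B =====
-- Literal port of B (Source B): reflection principle. _binom is Source B's hand-rolled
-- multiplicative binomial loop, _hits the per-image walk count, walk2_alt the
-- sum over mirror images t in range(-w, w+1).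
def binomB (n : Int) (k : Int) : Int :=
  (PySem.List.pyRange 0 k 1).foldl (fun c i => PySem.Int.floordiv (c * (n - i)) (i + 1)) 1

def hitsB (K : Int) (d : Int) : Int :=
  if d < -K ∨ d > K ∨ PySem.Int.mod (K + d) 2 ≠ 0 then 0
  else binomB K (PySem.Int.floordiv (K + d) 2)

def walk2_alt (N : Int) (M : Int) (K : Int) (P : Int) : Int :=
  if N < 2 ∨ K < 1 ∨ M < 1 ∨ M > N ∨ P < 1 ∨ P > N then 0
  else
    let L := N + 1
    let w := PySem.Int.floordiv K (2 * L) + 1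
    (PySem.List.pyRange (-w) (w + 1) 1).foldl
      (fun total t => total + hitsB K (M - P + 2 * t * L) - hitsB K (-M - P + 2 * t * L)) 0

-- ===== PRECONDITION & SPEC =====
def Spec_walk2 (N : Int) (M : Int) (K : Int) (P : Int) (out : Int) : Prop := out = walk2_alt N M K P
instance (N : Int) (M : Int) (K : Int) (P : Int) (out : Int) : Decidable (Spec_walk2 N M K P out) := by unfold Spec_walk2; infer_instance

-- ===== CLAIM (what is proved, stated in full; the proofs are below) =====
def Claim_equal_walk2 : Prop := ∀ (N : Int) (M : Int) (K : Int) (P : Int), Dom_walk2 N M K P → Spec_walk2 N M K P (walk2 N M K P)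

-- ===== LEMMAS AND PROOFS =====

-- ---------- A-side: walk2 computes the walk-count recursion wg ----------
def wg (N : Int) (P : Int) : Nat → Int → Int
  | 0, j => if j = P then 1 else 0
  | r+1, j => if j = 1 then wg N P r 2
              else if j = N then wg N P r (N-1)
              else wg N P r (j-1) + wg N P r (j+1)

def wrow (N : Int) (P : Int) (r : Nat) : List Int :=
  0 :: (PySem.List.pyRange 1 (N+1) 1).map (wg N P r)

lemma length_wrow (N P : Int) (hN : 0 ≤ N) (r : Nat) : (wrow N P r).length = N.toNat + 1 := by
  simp [wrow, PySem.List.length_pyRange_one]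

lemma read_wrow (N P : Int) (hN : 0 ≤ N) (r : Nat) (j : Int) (h1 : 1 ≤ j) (h2 : j ≤ N) :
    PySem.List.pyGetD (wrow N P r) j 0 = wg N P r j := by
  have hlen : (wrow N P r).length = N.toNat + 1 := length_wrow N P hN r
  rw [PySem.List.pyGetD_eq_getElem _ _ (by omega) (by rw [hlen]; push_cast; omega)]
  have hsome : (wrow N P r)[j.toNat]? = some (wg N P r j) := by
    have hjn : j.toNat = (j.toNat - 1) + 1 := by omega
    rw [wrow, hjn, List.getElem?_cons_succ, List.getElem?_map,
        PySem.List.getElem?_pyRange_one]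
    rw [if_pos (by omega : j.toNat - 1 < (N+1-1).toNat)]
    simp only [Option.map_some]
    have harg : (1 : Int) + ↑(j.toNat - 1) = j := by omega
    rw [harg]
  rw [List.getElem?_eq_some_iff] at hsome
  exact hsome.2

def pvVal (N : Int) (prev : List Int) (j : Int) : Int :=
  if j = 1 then PySem.List.pyGetD prev 2 0
  else if j = N then PySem.List.pyGetD prev (N-1) 0
  else PySem.List.pyGetD prev (j-1) 0 + PySem.List.pyGetD prev (j+1) 0

lemma step_wrow (N P : Int) (hN : 2 ≤ N) (r : Nat) :
    (0 :: (PySem.List.pyRange 1 (N+1) 1).map (fun j => pvVal N (wrow N P r) j)) = wrow N P (r+1) := by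
  conv_rhs => rw [wrow]
  congr 1
  apply List.map_congr_left
  intro j hj
  rw [PySem.List.mem_pyRange_one] at hj
  unfold pvVal
  simp only [wg]
  split_ifs with hj1 hjN
  · exact read_wrow N P (by omega) r 2 (by omega) (by omega)
  · exact read_wrow N P (by omega) r (N-1) (by omega) (by omega)
  · rw [read_wrow N P (by omega) r (j-1) (by omega) (by omega),
        read_wrow N P (by omega) r (j+1) (by omega) (by omega)]

def zrow (N : Int) : List Int := (PySem.List.pyRange 0 (N+1) 1).map (fun _ => (0:Int))

lemma length_zrow (N : Int) (hN : 0 ≤ N) : (zrow N).length = N.toNat + 1 := by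
  simp [zrow, PySem.List.length_pyRange_one]
  omega

lemma getElem?_zrow (N : Int) (k : Nat) (hk : k < N.toNat + 1) (hN : 0 ≤ N) :
    (zrow N)[k]? = some 0 := by
  rw [zrow, List.getElem?_map, PySem.List.getElem?_pyRange_one,
      if_pos (by omega : k < (N+1-0).toNat)]
  rfl

lemma getrow_set (α : Type) (T : List α) (i : Int) (R : α) (d : α)
    (h0 : 0 ≤ i) (hlen : i.toNat < T.length) :
    PySem.List.pyGetD (PySem.List.pySetD T i R) i d = R := by
  rw [PySem.List.pySetD_of_nonneg _ _ h0,
      PySem.List.pyGetD_eq_getElem _ _ h0 (by simp; omega)]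
  exact List.getElem_set_self _

lemma getrow_set_ne (α : Type) (T : List α) (i i' : Int) (R : α) (d : α)
    (h0 : 0 ≤ i) (h0' : 0 ≤ i') (hne : i.toNat ≠ i'.toNat) (h : i'.toNat < T.length) :
    PySem.List.pyGetD (PySem.List.pySetD T i R) i' d = PySem.List.pyGetD T i' d := by
  rw [PySem.List.pySetD_of_nonneg _ _ h0,
      PySem.List.pyGetD_eq_getElem _ _ h0' (by simp; omega),
      PySem.List.pyGetD_eq_getElem _ _ h0' (by push_cast; omega),
      List.getElem_set_ne hne]

lemma set_set_row (α : Type) (T : List α) (i : Int) (R1 R2 : α) (h0 : 0 ≤ i) :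
    PySem.List.pySetD (PySem.List.pySetD T i R1) i R2 = PySem.List.pySetD T i R2 := by
  rw [PySem.List.pySetD_of_nonneg _ _ h0, PySem.List.pySetD_of_nonneg _ _ h0,
      PySem.List.pySetD_of_nonneg _ _ h0, List.set_set]

lemma inner_commute (N : Int) (i : Int) (hi : 1 ≤ i) (js : List Int) :
    ∀ (T : List (List Int)), i.toNat < T.length →
    js.foldl (fun dp j =>
        PySem.List.pySetD dp i (PySem.List.pySetD (PySem.List.pyGetD dp i [])
          j (pvVal N (PySem.List.pyGetD dp (i-1) []) j))) T
    = PySem.List.pySetD T i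
        (js.foldl (fun row j => PySem.List.pySetD row j
            (pvVal N (PySem.List.pyGetD T (i-1) []) j))
          (PySem.List.pyGetD T i [])) := by
  induction js with
  | nil =>
    intro T hlen
    simp only [List.foldl_nil]
    rw [PySem.List.pyGetD_eq_getElem _ _ (by omega) (by push_cast; omega),
        PySem.List.pySetD_of_nonneg _ _ (by omega)]
    exact (List.set_getElem_self hlen).symm
  | cons j js ih =>
    intro T hlen
    simp only [List.foldl_cons]
    rw [ih _ (by rw [PySem.List.length_pySetD]; exact hlen)]
    rw [getrow_set_ne _ T i (i-1) _ [] (by omega) (by omega) (by omega) (by omega)]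
    rw [getrow_set _ T i _ [] (by omega) hlen]
    rw [set_set_row _ T i _ _ (by omega)]

lemma zrow_eq_map_range (N : Int) (hN : 0 ≤ N) :
    zrow N = (List.range (N.toNat+1)).map (fun _ => (0:Int)) := by
  apply List.ext_getElem?
  intro k
  by_cases hk : k < N.toNat + 1
  · rw [getElem?_zrow N k hk hN, List.getElem?_map, List.getElem?_range hk]
    rfl
  · rw [List.getElem?_eq_none (by simp [length_zrow N hN]; omega),
        List.getElem?_eq_none (by simp; omega)]

lemma row_build (N : Int) (hN : 2 ≤ N) (f : Int → Int) : ∀ (m : Nat), (m ≤ N.toNat) →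
    (PySem.List.pyRange 1 ((m:Int)+1) 1).foldl
        (fun row j => PySem.List.pySetD row j (f j)) (zrow N)
    = (List.range (N.toNat+1)).map (fun k => if 1 ≤ k ∧ k ≤ m then f (k:Int) else 0) := by
  intro m
  induction m with
  | zero =>
    intro _
    rw [PySem.List.pyRange_one_eq_nil (by omega), List.foldl_nil]
    simp only [Nat.le_zero]
    rw [zrow_eq_map_range N (by omega)]
    apply List.map_congr_left
    intro k _
    rw [if_neg (by omega)]
  | succ m ih =>
    intro hm
    rw [show ((m+1:Nat):Int)+1 = ((m:Int)+1)+1 by push_cast; ring]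
    rw [PySem.List.pyRange_one_succ_right (by omega : (1:Int) ≤ (m:Int)+1),
        List.foldl_append, List.foldl_cons, List.foldl_nil, ih (by omega)]
    rw [PySem.List.pySetD_of_nonneg _ _ (by omega : (0:Int) ≤ (m:Int)+1)]
    apply List.ext_getElem?
    intro k
    rw [List.getElem?_set]
    have hmt : ((m:Int)+1).toNat = m+1 := by omega
    rw [hmt, List.length_map, List.length_range]
    by_cases hk : k < N.toNat + 1
    · by_cases he : m+1 = k
      · rw [if_pos he, if_pos (by omega), List.getElem?_map, List.getElem?_range hk]
        simp only [Option.map_some]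
        rw [if_pos (by omega)]
        congr 2
        omega
      · rw [if_neg he, List.getElem?_map, List.getElem?_map, List.getElem?_range hk]
        simp only [Option.map_some]
        by_cases h1 : 1 ≤ k ∧ k ≤ m
        · rw [if_pos h1, if_pos (by omega)]
        · rw [if_neg h1, if_neg (by omega)]
    · rw [if_neg (by omega), List.getElem?_eq_none (by simp; omega),
          List.getElem?_eq_none (by simp; omega)]

lemma map_range_shift (n : Nat) (g : Int → Int) :
    (List.range (n+1)).map (fun k => if 1 ≤ k ∧ k ≤ n then g (k:Int) else 0)
    = 0 :: (PySem.List.pyRange 1 ((n:Int)+1) 1).map g := by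
  apply List.ext_getElem?
  intro k
  by_cases hk : k < n + 1
  · rw [List.getElem?_map, List.getElem?_range hk]
    cases k with
    | zero => simp
    | succ s =>
      rw [List.getElem?_cons_succ, List.getElem?_map,
          PySem.List.getElem?_pyRange_one, if_pos (by omega : s < ((n:Int)+1-1).toNat)]
      simp only [Option.map_some]
      rw [if_pos (by omega)]
      congr 2
      omega
  · rw [List.getElem?_eq_none (by simp; omega),
        List.getElem?_eq_none (by simp [PySem.List.length_pyRange_one]; omega)]

def tblA (N P : Int) (Kn : Nat) (i : Nat) : List (List Int) :=
  (List.range (Kn+1)).map (fun r => if r ≤ i then wrow N P r else zrow N)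

lemma length_tblA (N P : Int) (Kn i : Nat) : (tblA N P Kn i).length = Kn + 1 := by
  simp [tblA]

lemma getrow_tblA (N P : Int) (Kn i : Nat) (x : Int) (h0 : 0 ≤ x) (hx : x.toNat ≤ Kn) :
    PySem.List.pyGetD (tblA N P Kn i) x []
    = (if x.toNat ≤ i then wrow N P x.toNat else zrow N) := by
  rw [PySem.List.pyGetD_eq_getElem _ _ h0 (by rw [length_tblA]; omega)]
  simp only [tblA]
  rw [List.getElem_map, List.getElem_range]

lemma set_tblA (N P : Int) (Kn i : Nat) (hi : i + 1 ≤ Kn) :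
    PySem.List.pySetD (tblA N P Kn i) ((i:Int)+1) (wrow N P (i+1)) = tblA N P Kn (i+1) := by
  rw [PySem.List.pySetD_of_nonneg _ _ (by omega), show ((i:Int)+1).toNat = i+1 by omega]
  apply List.ext_getElem?
  intro k
  rw [List.getElem?_set, length_tblA]
  simp only [tblA]
  by_cases hk : k < Kn + 1
  · rw [List.getElem?_map, List.getElem?_map, List.getElem?_range hk]
    by_cases he : i + 1 = k
    · rw [if_pos he, if_pos (by omega)]
      simp only [Option.map_some]
      rw [if_pos (by omega), he]
    · rw [if_neg he]
      simp only [Option.map_some]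
      by_cases h1 : k ≤ i
      · rw [if_pos h1, if_pos (by omega)]
      · rw [if_neg h1, if_neg (by omega)]
  · rw [if_neg (by omega), List.getElem?_eq_none (by simp; omega),
        List.getElem?_eq_none (by simp; omega)]

lemma outerA (N P K : Int) (hN : 2 ≤ N) (hK : 1 ≤ K) : ∀ (i : Nat), i ≤ K.toNat →
    (PySem.List.pyRange 1 ((i:Int)+1) 1).foldl
      (fun dp iv => (PySem.List.pyRange 1 (N+1) 1).foldl
        (fun dp j => PySem.List.pySetD dp iv (PySem.List.pySetD (PySem.List.pyGetD dp iv [])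
            j (pvVal N (PySem.List.pyGetD dp (iv-1) []) j))) dp)
      (tblA N P K.toNat 0)
    = tblA N P K.toNat i := by
  intro i
  induction i with
  | zero =>
    intro _
    rw [show ((0:Nat):Int)+1 = 1 by simp,
        PySem.List.pyRange_one_eq_nil (le_refl 1), List.foldl_nil]
  | succ i ih =>
    intro hi
    rw [show ((i+1:Nat):Int)+1 = ((i:Int)+1)+1 by push_cast; ring,
        PySem.List.pyRange_one_succ_right (by omega : (1:Int) ≤ (i:Int)+1),
        List.foldl_append, List.foldl_cons, List.foldl_nil, ih (by omega)]
    rw [inner_commute N ((i:Int)+1) (by omega) _ (tblA N P K.toNat i)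
        (by rw [length_tblA]; omega)]
    rw [show ((i:Int)+1-1) = (i:Int) by ring]
    rw [getrow_tblA N P K.toNat i (i:Int) (by omega) (by omega),
        if_pos (by omega : ((i:Int)).toNat ≤ i)]
    rw [getrow_tblA N P K.toNat i ((i:Int)+1) (by omega) (by omega),
        if_neg (by omega : ¬((i:Int)+1).toNat ≤ i)]
    rw [show ((i:Int)).toNat = i from by omega]
    rw [show (N+1 : Int) = ((N.toNat:Int)+1) by omega]
    rw [row_build N hN (fun j => pvVal N (wrow N P i) j) N.toNat le_rfl]
    rw [map_range_shift N.toNat (fun j => pvVal N (wrow N P i) j)]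
    rw [show ((N.toNat:Int)+1) = N+1 by omega]
    rw [step_wrow N P hN i]
    exact set_tblA N P K.toNat i (by omega)

lemma set_zrow_P (N P : Int) (hN : 0 ≤ N) (hP1 : 1 ≤ P) (hPN : P ≤ N) :
    PySem.List.pySetD (zrow N) P 1 = wrow N P 0 := by
  rw [PySem.List.pySetD_of_nonneg _ _ (by omega)]
  apply List.ext_getElem?
  intro k
  rw [List.getElem?_set, length_zrow N hN]
  by_cases hk : k < N.toNat + 1
  · by_cases he : P.toNat = k
    · rw [if_pos he, if_pos (by omega)]
      have hks : k = (k - 1) + 1 := by omega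
      rw [wrow, hks, List.getElem?_cons_succ, List.getElem?_map,
          PySem.List.getElem?_pyRange_one, if_pos (by omega : k - 1 < ((N+1)-1).toNat)]
      simp only [Option.map_some, wg]
      rw [if_pos (by omega)]
    · rw [if_neg he, getElem?_zrow N k hk hN]
      cases k with
      | zero => rw [wrow, List.getElem?_cons_zero]
      | succ s =>
        rw [wrow, List.getElem?_cons_succ, List.getElem?_map,
            PySem.List.getElem?_pyRange_one, if_pos (by omega : s < ((N+1)-1).toNat)]
        simp only [Option.map_some, wg]
        rw [if_neg (by omega)]
  · rw [if_neg (by omega),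
        List.getElem?_eq_none (by rw [length_zrow N hN]; omega),
        List.getElem?_eq_none (by rw [length_wrow N P hN 0]; omega)]

lemma dp1_eq_tbl0 (N P K : Int) (hK : 1 ≤ K) :
    PySem.List.pySetD ((PySem.List.pyRange 0 (K+1) 1).map (fun _ => zrow N)) 0 (wrow N P 0)
    = tblA N P K.toNat 0 := by
  rw [PySem.List.pySetD_of_nonneg _ _ (by omega : (0:Int) ≤ 0)]
  apply List.ext_getElem?
  intro k
  rw [List.getElem?_set]
  simp only [Int.toNat_zero, tblA]
  by_cases hk : k < K.toNat + 1
  · by_cases he : 0 = k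
    · rw [if_pos he, if_pos (by simp [PySem.List.length_pyRange_one]; omega),
          List.getElem?_map, List.getElem?_range hk]
      simp only [Option.map_some]
      rw [if_pos (by omega), ← he]
    · rw [if_neg he, List.getElem?_map, List.getElem?_map,
          PySem.List.getElem?_pyRange_one, if_pos (by omega : k < ((K+1)-0).toNat),
          List.getElem?_range hk]
      simp only [Option.map_some]
      rw [if_neg (by omega)]
  · rw [if_neg (by omega),
        List.getElem?_eq_none (by simp [PySem.List.length_pyRange_one]; omega),
        List.getElem?_eq_none (by simp; omega)]

lemma walk2_closed (N M K P : Int) (hN : 2 ≤ N) (hK : 1 ≤ K) (hM1 : 1 ≤ M) (hMN : M ≤ N)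
    (hP1 : 1 ≤ P) (hPN : P ≤ N) : walk2 N M K P = wg N P K.toNat M := by
  simp only [walk2]
  rw [if_neg (by omega)]
  rw [show ((PySem.List.pyRange 0 (N+1) 1).map (fun _ => (0:Int))) = zrow N from rfl]
  have hget0 : PySem.List.pyGetD ((PySem.List.pyRange 0 (K+1) 1).map (fun _ => zrow N)) 0 []
      = zrow N := by
    rw [PySem.List.pyGetD_eq_getElem _ _ (le_refl 0)
        (by simp [PySem.List.length_pyRange_one]; omega)]
    rw [List.getElem_map]
  rw [hget0, set_zrow_P N P (by omega) hP1 hPN, dp1_eq_tbl0 N P K hK]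
  have hfun : (fun (dp : List (List Int)) (i : Int) =>
      (PySem.List.pyRange 1 (N+1) 1).foldl (fun dp j =>
        let v : Int :=
          if j = 1 then PySem.List.pyGetD (PySem.List.pyGetD dp (i-1) []) 2 0
          else if j = N then PySem.List.pyGetD (PySem.List.pyGetD dp (i-1) []) (N-1) 0
          else PySem.List.pyGetD (PySem.List.pyGetD dp (i-1) []) (j-1) 0
               + PySem.List.pyGetD (PySem.List.pyGetD dp (i-1) []) (j+1) 0
        PySem.List.pySetD dp i (PySem.List.pySetD (PySem.List.pyGetD dp i []) j v)) dp)
      = (fun (dp : List (List Int)) (i : Int) =>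
      (PySem.List.pyRange 1 (N+1) 1).foldl (fun dp j =>
        PySem.List.pySetD dp i (PySem.List.pySetD (PySem.List.pyGetD dp i [])
          j (pvVal N (PySem.List.pyGetD dp (i-1) []) j))) dp) := rfl
  rw [hfun, show (K+1 : Int) = ((K.toNat:Int)+1) by omega,
      outerA N P K hN hK K.toNat le_rfl]
  rw [getrow_tblA N P K.toNat K.toNat K (by omega) (by omega), if_pos (le_refl _)]
  exact read_wrow N P (by omega) K.toNat M hM1 hMN

-- ---------- B-side: the reflection sum computes the same recursion ----------

-- Wf k d = number of unconstrained ±1 walks of length k with net displacement d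
def Wf (k : Nat) (d : Int) : Int :=
  if d < -(k:Int) ∨ (k:Int) < d ∨ ((k:Int) + d) % 2 ≠ 0 then 0
  else (k.choose (((k:Int) + d) / 2).toNat : Int)

lemma binom_eq (n : Nat) : ∀ k : Nat, k ≤ n → binomB (n:Int) (k:Int) = (n.choose k : Int) := by
  intro k
  induction k with
  | zero =>
    intro _
    simp [binomB]
  | succ k ih =>
    intro hk
    unfold binomB
    rw [show ((k+1:Nat):Int) = (k:Int)+1 by push_cast; ring,
        PySem.List.pyRange_one_succ_right (by omega : (0:Int) ≤ (k:Int)),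
        List.foldl_append, List.foldl_cons, List.foldl_nil]
    have hfold := ih (by omega)
    unfold binomB at hfold
    rw [hfold]
    have hnk : (n:Int) - (k:Int) = ((n - k : Nat) : Int) := by omega
    rw [hnk, show ((k:Int)+1) = ((k+1:Nat):Int) by push_cast; ring]
    rw [show ((n.choose k : Nat) : Int) * ((n - k : Nat) : Int) = ((n.choose k * (n-k) : Nat) : Int) by push_cast; ring]
    rw [PySem.Int.floordiv_natCast]
    rw [← Nat.choose_succ_right_eq n k]
    rw [Nat.mul_div_cancel _ (by omega)]
lemma hits_eq (K : Int) (hK : 0 ≤ K) (d : Int) : hitsB K d = Wf K.toNat d := by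
  unfold hitsB Wf
  have hc : ((K.toNat:Nat) : Int) = K := by omega
  rw [hc]
  rw [PySem.Int.mod_eq_emod_of_pos (by omega : (0:Int) < 2)]
  by_cases h : d < -K ∨ K < d ∨ (K + d) % 2 ≠ 0
  · rw [if_pos (by omega), if_pos h]
  · rw [if_neg (by omega), if_neg h]
    rw [PySem.Int.floordiv_eq_ediv_of_pos (by omega : (0:Int) < 2)]
    calc binomB K ((K+d)/2)
        = binomB (K.toNat:Int) (((((K+d)/2).toNat : Nat)):Int) := by rw [hc]; congr 1; omega
      _ = (K.toNat.choose (((K+d)/2).toNat) : Int) := binom_eq _ _ (by omega)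
lemma Wf_succ (k : Nat) (d : Int) : Wf (k+1) d = Wf k (d-1) + Wf k (d+1) := by
  unfold Wf
  push_cast
  by_cases hp : ((k:Int) + 1 + d) % 2 = 0
  · by_cases h1 : d < -((k:Int)+1)
    · rw [if_pos (by omega), if_pos (by omega), if_pos (by omega)]; ring
    · by_cases h2 : ((k:Int)+1) < d
      · rw [if_pos (by omega), if_pos (by omega), if_pos (by omega)]; ring
      · by_cases hlo : d = -((k:Int)+1)
        · rw [if_neg (by omega), if_pos (by omega), if_neg (by omega)]
          rw [show (((k:Int) + 1 + d) / 2).toNat = 0 by omega,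
              show (((k:Int) + (d+1)) / 2).toNat = 0 by omega]
          simp
        · by_cases hhi : d = (k:Int)+1
          · rw [if_neg (by omega), if_neg (by omega), if_pos (by omega)]
            rw [show (((k:Int) + 1 + d) / 2).toNat = k+1 by omega,
                show (((k:Int) + (d-1)) / 2).toNat = k by omega]
            simp [Nat.choose_self]
          · rw [if_neg (by omega), if_neg (by omega), if_neg (by omega)]
            have hu1 : (1:Int) ≤ ((k:Int) + 1 + d) / 2 := by omega
            rw [show (((k:Int) + (d-1)) / 2).toNat = (((k:Int) + 1 + d) / 2).toNat - 1 by omega,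
                show (((k:Int) + (d+1)) / 2).toNat = (((k:Int) + 1 + d) / 2).toNat by omega]
            rw [show (((k:Int) + 1 + d) / 2).toNat = ((((k:Int) + 1 + d) / 2).toNat - 1) + 1 by omega]
            rw [Nat.choose_succ_succ]
            push_cast
            ring
  · rw [if_pos (by omega), if_pos (by omega), if_pos (by omega)]; ring
lemma Wf_zero (d : Int) : Wf 0 d = if d = 0 then 1 else 0 := by
  unfold Wf
  by_cases hd : d = 0
  · subst hd; norm_num
  · rw [if_neg hd, if_pos (by omega)]
lemma Wf_out (k : Nat) (d : Int) (h : (k:Int) < d ∨ d < -(k:Int)) : Wf k d = 0 := by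
  unfold Wf
  rw [if_pos (by omega)]

-- the reflection sum over images t ∈ [-w, w]
def Hs (a L w : Int) (k : Nat) (b : Int) : Int :=
  ((PySem.List.pyRange (-w) (w+1) 1).map
    (fun t => Wf k (b - a + 2*t*L) - Wf k (-b - a + 2*t*L))).sum

lemma Hs_zero (a L w : Int) (k : Nat) : Hs a L w k 0 = 0 := by
  unfold Hs
  rw [List.sum_eq_zero]
  intro x hx
  rw [List.mem_map] at hx
  obtain ⟨t, _, ht⟩ := hx
  rw [← ht, show (0:Int) - a + 2*t*L = -0 - a + 2*t*L from by ring, sub_self]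

lemma tele_sum (f : Int → Int) : ∀ (n : Nat) (a : Int),
    ((PySem.List.pyRange a (a + (n:Int)) 1).map (fun t => f t - f (t-1))).sum
    = f (a + (n:Int) - 1) - f (a - 1) := by
  intro n
  induction n with
  | zero =>
    intro a
    rw [show a + ((0:Nat):Int) = a by push_cast; ring, PySem.List.pyRange_one_eq_nil le_rfl]
    simp
  | succ n ih =>
    intro a
    rw [show a + ((n+1:Nat):Int) = (a + (n:Int)) + 1 by push_cast; ring,
        PySem.List.pyRange_one_succ_right (by omega : a ≤ a + (n:Int)),
        List.map_append, List.sum_append, ih a]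
    simp only [List.map_cons, List.map_nil, List.sum_cons, List.sum_nil]
    rw [show a + (n:Int) + 1 - 1 = a + (n:Int) by ring]
    ring
lemma Hs_L (a L w : Int) (k : Nat) (hL : 3 ≤ L) (ha1 : 1 ≤ a) (ha2 : a ≤ L - 1)
    (hw : 1 ≤ w) (hk : (k:Int) < 2*w*L) : Hs a L w k L = 0 := by
  unfold Hs
  have hcong : (PySem.List.pyRange (-w) (w+1) 1).map
      (fun t => Wf k (L - a + 2*t*L) - Wf k (-L - a + 2*t*L))
      = (PySem.List.pyRange (-w) (-w + ((2*w+1).toNat : Int)) 1).map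
        (fun t => (fun s => Wf k ((2*s+1)*L - a)) t - (fun s => Wf k ((2*s+1)*L - a)) (t-1)) := by
    rw [show -w + ((2*w+1).toNat : Int) = w + 1 by omega]
    apply List.map_congr_left
    intro t _
    beta_reduce
    rw [show (2*t+1)*L - a = L - a + 2*t*L by ring,
        show (2*(t-1)+1)*L - a = -L - a + 2*t*L by ring]
  rw [hcong, tele_sum]
  show (fun s => Wf k ((2*s+1)*L - a)) _ - (fun s => Wf k ((2*s+1)*L - a)) _ = 0
  have hz1 : Wf k ((2*(-w + ((2*w+1).toNat:Int) - 1)+1)*L - a) = 0 := by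
    apply Wf_out
    left
    rw [show -w + ((2*w+1).toNat:Int) - 1 = w by omega,
        show (2*w+1)*L - a = 2*w*L + (L - a) by ring]
    linarith
  have hz2 : Wf k ((2*(-w - 1)+1)*L - a) = 0 := by
    apply Wf_out
    right
    rw [show (2*(-w-1)+1)*L - a = -(2*w*L) - L - a by ring]
    linarith
  beta_reduce
  rw [hz1, hz2]
  ring
lemma Hs_succ (a L w : Int) (k : Nat) (b : Int) :
    Hs a L w (k+1) b = Hs a L w k (b-1) + Hs a L w k (b+1) := by
  unfold Hs
  rw [← PySem.List.sum_map_add_int]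
  apply congrArg
  apply List.map_congr_left
  intro t _
  rw [Wf_succ k (b - a + 2*t*L), Wf_succ k (-b - a + 2*t*L)]
  rw [show b - a + 2*t*L - 1 = b - 1 - a + 2*t*L by ring,
      show b - a + 2*t*L + 1 = b + 1 - a + 2*t*L by ring,
      show -b - a + 2*t*L - 1 = -(b+1) - a + 2*t*L by ring,
      show -b - a + 2*t*L + 1 = -(b-1) - a + 2*t*L by ring]
  ring
lemma Hs_base (a L w : Int) (b : Int) (hL : 3 ≤ L) (ha1 : 1 ≤ a) (ha2 : a ≤ L - 1)
    (hb1 : 1 ≤ b) (hb2 : b ≤ L - 1) (hw : 1 ≤ w) :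
    Hs a L w 0 b = if b = a then 1 else 0 := by
  unfold Hs
  have hcong : (PySem.List.pyRange (-w) (w+1) 1).map
      (fun t => Wf 0 (b - a + 2*t*L) - Wf 0 (-b - a + 2*t*L))
      = (PySem.List.pyRange (-w) (w+1) 1).map
        (fun t => if t = 0 ∧ b = a then (1:Int) else 0) := by
    apply List.map_congr_left
    intro t _
    rw [Wf_zero, Wf_zero]
    by_cases ht0 : t = 0
    · subst ht0
      rw [show b - a + 2*(0:Int)*L = b - a by ring, show -b - a + 2*(0:Int)*L = -b - a by ring]
      rw [if_neg (by omega : ¬ -b - a = 0)]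
      by_cases hba : b = a
      · rw [if_pos (by omega), if_pos (by exact ⟨rfl, hba⟩)]; ring
      · rw [if_neg (by omega), if_neg (by simp [hba])]; ring
    · have h2 : 2*t*L ≥ 2*L ∨ 2*t*L ≤ -(2*L) := by
        rcases lt_or_gt_of_ne ht0 with h|h
        · right; nlinarith
        · left; nlinarith
      have hx1 : ¬(b - a + 2*t*L = 0) := by
        rcases h2 with h|h <;> intro heq <;> linarith
      have hx2 : ¬(-b - a + 2*t*L = 0) := by
        rcases h2 with h|h <;> intro heq <;> linarith
      rw [if_neg hx1, if_neg hx2, if_neg (by simp [ht0])]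
      norm_num
  rw [hcong, PySem.List.pyRange_one_append (-w) 0 (w+1) (by omega) (by omega),
      PySem.List.pyRange_one_cons (by omega : (0:Int) < w+1),
      List.map_append, List.map_cons, List.sum_append, List.sum_cons]
  have hneg : ((PySem.List.pyRange (-w) 0 1).map
      (fun t => if t = 0 ∧ b = a then (1:Int) else 0)).sum = 0 := by
    apply List.sum_eq_zero
    intro x hx
    rw [List.mem_map] at hx
    obtain ⟨t, ht, rfl⟩ := hx
    rw [PySem.List.mem_pyRange_one] at ht
    rw [if_neg (by omega)]
  have hpos : ((PySem.List.pyRange 1 (w+1) 1).map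
      (fun t => if t = 0 ∧ b = a then (1:Int) else 0)).sum = 0 := by
    apply List.sum_eq_zero
    intro x hx
    rw [List.mem_map] at hx
    obtain ⟨t, ht, rfl⟩ := hx
    rw [PySem.List.mem_pyRange_one] at ht
    rw [if_neg (by omega)]
  rw [hneg, show (0:Int) + 1 = 1 from by ring, hpos]
  by_cases hba : b = a
  · rw [if_pos ⟨rfl, hba⟩, if_pos hba]
    ring
  · rw [if_neg (by simp [hba]), if_neg hba]
    ring
lemma wg_eq_Hs (N P K w : Int) (hN : 2 ≤ N) (hP1 : 1 ≤ P) (hPN : P ≤ N)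
    (hw : 1 ≤ w) (hKw : K < 2*w*(N+1)) : ∀ (k : Nat), (k:Int) ≤ K →
    ∀ b : Int, 1 ≤ b → b ≤ N → wg N P k b = Hs P (N+1) w k b := by
  intro k
  induction k with
  | zero =>
    intro _ b hb1 hb2
    rw [Hs_base P (N+1) w b (by omega) (by omega) (by omega) hb1 (by omega) hw]
    simp only [wg]
  | succ k ih =>
    intro hk b hb1 hb2
    rw [Hs_succ]
    simp only [wg]
    split_ifs with h1 hN'
    · subst h1
      rw [show (1:Int) - 1 = 0 by ring, Hs_zero, zero_add]
      exact ih (by omega) 2 (by omega) (by omega)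
    · rw [hN']
      rw [Hs_L P (N+1) w k (by omega) (by omega) (by omega) hw (by omega), add_zero]
      exact ih (by omega) (N-1) (by omega) (by omega)
    · rw [ih (by omega) (b-1) (by omega) (by omega), ih (by omega) (b+1) (by omega) (by omega)]

lemma walk2_alt_eq_Hs (N M K P : Int) (hN : 2 ≤ N) (hK : 1 ≤ K) (hM1 : 1 ≤ M) (hMN : M ≤ N)
    (hP1 : 1 ≤ P) (hPN : P ≤ N) :
    walk2_alt N M K P = Hs P (N+1) (PySem.Int.floordiv K (2*(N+1)) + 1) K.toNat M := by
  simp only [walk2_alt]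
  rw [if_neg (by omega)]
  have hfun : (fun (total t : Int) =>
      total + hitsB K (M - P + 2*t*(N+1)) - hitsB K (-M - P + 2*t*(N+1)))
      = (fun (total t : Int) =>
      total + (Wf K.toNat (M - P + 2*t*(N+1)) - Wf K.toNat (-M - P + 2*t*(N+1)))) := by
    funext total t
    rw [hits_eq K (by omega), hits_eq K (by omega)]
    ring
  rw [hfun, PySem.List.foldl_add, zero_add]
  rfl

lemma w_facts (N K : Int) (hN : 2 ≤ N) (hK : 1 ≤ K) :
    1 ≤ PySem.Int.floordiv K (2*(N+1)) + 1 ∧ K < 2*(PySem.Int.floordiv K (2*(N+1)) + 1)*(N+1) := by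
  have hq := PySem.Int.floordiv_mul_add_mod K (2*(N+1))
  have hm := PySem.Int.mod_lt (a := K) (by omega : (0:Int) < 2*(N+1))
  have hm0 := PySem.Int.mod_nonneg (a := K) (by omega : (0:Int) < 2*(N+1))
  set q := PySem.Int.floordiv K (2*(N+1)) with hqdef
  constructor
  · nlinarith
  · nlinarith

lemma walk2_alt_closed (N M K P : Int) (hN : 2 ≤ N) (hK : 1 ≤ K) (hM1 : 1 ≤ M) (hMN : M ≤ N)
    (hP1 : 1 ≤ P) (hPN : P ≤ N) : walk2_alt N M K P = wg N P K.toNat M := by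
  obtain ⟨hw1, hw2⟩ := w_facts N K hN hK
  rw [walk2_alt_eq_Hs N M K P hN hK hM1 hMN hP1 hPN]
  exact (wg_eq_Hs N P K _ hN hP1 hPN hw1 hw2 K.toNat (by omega) M hM1 hMN).symm

-- ===== VERDICT (by name: the statement is the Claim_ definition above) =====
theorem walk2_spec : Claim_equal_walk2 := by
  intro N M K P _
  unfold Spec_walk2
  by_cases h : N < 2 ∨ K < 1 ∨ M < 1 ∨ M > N ∨ P < 1 ∨ P > N
  · simp only [walk2, walk2_alt, if_pos h]
  · have h' : ¬(N < 2 ∨ K < 1 ∨ M < 1 ∨ M > N ∨ P < 1 ∨ P > N) := h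
    rw [walk2_closed N M K P (by omega) (by omega) (by omega) (by omega) (by omega) (by omega),
        walk2_alt_closed N M K P (by omega) (by omega) (by omega) (by omega) (by omega) (by omega)]
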